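-- pv_equiv track=rewrite | github.com/Kawser-nerd/CLCDSA | Source Codes/AtCoder/agc001/B/4384570.py | solve
-- ===== SOURCE A (Python) =====
-- def solve(s, a, b):
--     if a % b == 0:
--         return s + ((a // b) * 2 - 1) * b
--     if b % a == 0:
--         return s + ((b // a) * 2 - 1) * a
--     elif a > b:
--         s += (a // b) * 2 * b
--         return solve(s, a % b, b)
--     else:
--         s += (b // a) * 2 * a
--         return solve(s, a, b % a)
-- ===== SOURCE B (Python) =====
-- def solve(s, a, b):
--     # Closed form: the Euclidean accumulation telescopes to 2*(a+b) - 3*gcd(a,b).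
--     x, y = a, b
--     while y:
--         x, y = y, x % y
--     return s + 2 * (a + b) - 3 * x
-- ===== Notes on version B (the rewrite author's own statement) =====
-- stated objective: alternative
-- what changed: Replaces the branching recursive accumulation by the closed form s + 2*(a+b) - 3*gcd(a,b), with gcd computed by a plain Euclid loop.
-- outside the precondition, e.g. on solve(0, -1, 5): A returns 11, B returns 5; on solve(0, 3, -2): A returns 5, B returns 5; on solve(0, 2, -5): A does not finish within the time limit, B returns -3
import Mathlib
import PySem

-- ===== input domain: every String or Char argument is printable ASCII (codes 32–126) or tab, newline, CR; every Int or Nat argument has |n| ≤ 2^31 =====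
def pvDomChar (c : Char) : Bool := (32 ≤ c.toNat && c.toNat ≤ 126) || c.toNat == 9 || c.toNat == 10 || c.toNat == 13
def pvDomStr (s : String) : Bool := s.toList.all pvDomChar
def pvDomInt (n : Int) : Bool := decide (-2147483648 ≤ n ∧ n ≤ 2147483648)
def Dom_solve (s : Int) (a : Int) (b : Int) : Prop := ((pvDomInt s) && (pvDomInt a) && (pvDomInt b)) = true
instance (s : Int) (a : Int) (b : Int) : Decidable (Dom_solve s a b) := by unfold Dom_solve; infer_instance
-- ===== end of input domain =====

-- B replaces A's branching recursive accumulation by the closed form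
-- s + 2*(a+b) - 3*gcd(a,b) with gcd computed by a plain Euclid loop (objective: alternative).

-- ===== PORT A =====
-- Literal transliteration of A's recursion; the Nat fuel only makes the
-- recursion total (inside Pre_solve the fuel is never exhausted).
def solveGo : Nat → Int → Int → Int → Int
  | 0, s, _, _ => s
  | Nat.succ n, s, a, b =>
    if PySem.Int.mod a b = 0 then s + (PySem.Int.floordiv a b * 2 - 1) * b
    else if PySem.Int.mod b a = 0 then s + (PySem.Int.floordiv b a * 2 - 1) * a
    else if a > b then solveGo n (s + PySem.Int.floordiv a b * 2 * b) (PySem.Int.mod a b) b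
    else solveGo n (s + PySem.Int.floordiv b a * 2 * a) a (PySem.Int.mod b a)

def solve (s : Int) (a : Int) (b : Int) : Int := solveGo ((a + b).toNat + 1) s a b

-- ===== PORT B =====
-- Source B's `while y: x, y = y, x % y` loop, again with fuel for totality.
def euclidGo : Nat → Int → Int → Int
  | 0, x, _ => x
  | Nat.succ n, x, y => if y = 0 then x else euclidGo n y (PySem.Int.mod x y)

def solve_alt (s : Int) (a : Int) (b : Int) : Int :=
  s + 2 * (a + b) - 3 * euclidGo (b.natAbs + 1) a b

-- ===== PRECONDITION & SPEC =====
-- Pre_ restricts to the problem's natural domain of positive a, b: b = 0 raises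
-- ZeroDivisionError in A, and on other non-positive inputs A's recursion diverges
-- (RecursionError, e.g. (0, 2, -5)) or returns accidental mixed-sign values.
def Pre_solve (s : Int) (a : Int) (b : Int) : Prop := 0 < a ∧ 0 < b
instance (s : Int) (a : Int) (b : Int) : Decidable (Pre_solve s a b) := by unfold Pre_solve; infer_instance

def pvWitness_solve : Int × Int × Int := (0, 6, 4)

def Spec_solve (s : Int) (a : Int) (b : Int) (out : Int) : Prop := out = solve_alt s a b
instance (s : Int) (a : Int) (b : Int) (out : Int) : Decidable (Spec_solve s a b out) := by unfold Spec_solve; infer_instance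

-- ===== CLAIM (what is proved, stated in full; the proofs are below) =====
def Claim_equal_solve : Prop := ∀ (s : Int) (a : Int) (b : Int), Dom_solve s a b → Pre_solve s a b → Spec_solve s a b (solve s a b)

-- ===== LEMMAS AND PROOFS =====

lemma euclidGo_eq_gcd : ∀ (n : Nat) (x y : Int), 0 ≤ x → 0 ≤ y → y.natAbs < n →
    euclidGo n x y = Int.gcd x y := by
  intro n
  induction n with
  | zero => intro x y _ _ h; omega
  | succ n ih =>
    intro x y hx hy hn
    by_cases h0 : y = 0
    · subst h0
      rw [show euclidGo (n+1) x 0 = x from by simp [euclidGo], Int.gcd_zero_right]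
      omega
    · have hy' : 0 < y := lt_of_le_of_ne hy (Ne.symm h0)
      have hmod : PySem.Int.mod x y = x % y := PySem.Int.mod_eq_emod_of_pos hy'
      have h1 : 0 ≤ x % y := Int.emod_nonneg x h0
      have h2 : x % y < y := Int.emod_lt_of_pos x hy'
      rw [show euclidGo (n+1) x y = euclidGo n y (PySem.Int.mod x y) from by simp [euclidGo, h0]]
      rw [hmod, ih y (x % y) hy h1 (by omega)]
      rw [Int.gcd_comm y (x % y), Int.gcd_emod]

lemma gcd_cast_of_dvd_right {a b : Int} (hb : 0 < b) (h : b ∣ a) :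
    (Int.gcd a b : Int) = b := by
  have : Int.gcd a b = b.natAbs := by
    unfold Int.gcd
    exact Nat.gcd_eq_right (Int.natAbs_dvd_natAbs.mpr h)
  rw [this]; omega

lemma solveGo_eq : ∀ (n : Nat) (s a b : Int), 0 < a → 0 < b → (a + b).toNat ≤ n →
    solveGo n s a b = s + 2 * (a + b) - 3 * Int.gcd a b := by
  intro n
  induction n with
  | zero => intro s a b ha hb h; omega
  | succ n ih =>
    intro s a b ha hb hn
    have hbne : b ≠ 0 := by omega
    have hane : a ≠ 0 := by omega
    have hmab : PySem.Int.mod a b = a % b := PySem.Int.mod_eq_emod_of_pos hb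
    have hmba : PySem.Int.mod b a = b % a := PySem.Int.mod_eq_emod_of_pos ha
    have hdab : PySem.Int.floordiv a b = a / b := PySem.Int.floordiv_eq_ediv_of_pos hb
    have hdba : PySem.Int.floordiv b a = b / a := PySem.Int.floordiv_eq_ediv_of_pos ha
    by_cases h1 : PySem.Int.mod a b = 0
    · have hdvd : b ∣ a := Int.dvd_of_emod_eq_zero (by rwa [hmab] at h1)
      have hq : a / b * b = a := Int.ediv_mul_cancel hdvd
      rw [show solveGo (n+1) s a b = s + (PySem.Int.floordiv a b * 2 - 1) * b from by
            simp [solveGo, h1]]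
      rw [hdab, gcd_cast_of_dvd_right hb hdvd]
      linear_combination 2 * hq
    · by_cases h2 : PySem.Int.mod b a = 0
      · have hdvd : a ∣ b := Int.dvd_of_emod_eq_zero (by rwa [hmba] at h2)
        have hq : b / a * a = b := Int.ediv_mul_cancel hdvd
        rw [show solveGo (n+1) s a b = s + (PySem.Int.floordiv b a * 2 - 1) * a from by
              simp [solveGo, h1, h2]]
        rw [hdba, Int.gcd_comm, gcd_cast_of_dvd_right ha hdvd]
        linear_combination 2 * hq
      · by_cases h3 : a > b
        · have hr0 : 0 < a % b := by
            have hnz : a % b ≠ 0 := by rwa [hmab] at h1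
            have := Int.emod_nonneg a hbne
            omega
          have hrb : a % b < b := Int.emod_lt_of_pos a hb
          have hq : a % b + b * (a / b) = a := Int.emod_add_mul_ediv a b
          rw [show solveGo (n+1) s a b
                = solveGo n (s + PySem.Int.floordiv a b * 2 * b) (PySem.Int.mod a b) b from by
            simp [solveGo, h1, h2, h3]]
          rw [hmab, hdab, ih _ _ _ hr0 hb (by omega)]
          rw [Int.gcd_emod]
          linear_combination 2 * hq
        · have hab : a < b := by
            rcases lt_trichotomy a b with h | h | h
            · exact h
            · exact absurd (by rw [hmab, h, Int.emod_self]) h1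
            · exact absurd h h3
          have hr0 : 0 < b % a := by
            have hnz : b % a ≠ 0 := by rwa [hmba] at h2
            have := Int.emod_nonneg b hane
            omega
          have hra : b % a < a := Int.emod_lt_of_pos b ha
          have hq : b % a + a * (b / a) = b := Int.emod_add_mul_ediv b a
          rw [show solveGo (n+1) s a b
                = solveGo n (s + PySem.Int.floordiv b a * 2 * a) a (PySem.Int.mod b a) from by
            simp [solveGo, h1, h2, h3]]
          rw [hmba, hdba, ih _ _ _ ha hr0 (by omega)]
          rw [Int.gcd_comm a (b % a), Int.gcd_emod, Int.gcd_comm]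
          linear_combination 2 * hq

-- ===== VERDICT (by name: the statement is the Claim_ definition above) =====
theorem solve_spec : Claim_equal_solve := by
  intro s a b _ hpre
  obtain ⟨ha, hb⟩ := hpre
  unfold Spec_solve solve solve_alt
  rw [solveGo_eq _ s a b ha hb (by omega),
      euclidGo_eq_gcd _ a b (by omega) (by omega) (by omega)]
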